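-- pv_equiv track=rewrite | github.com/adeland/lcsolutions | Minimum Common Value.py | getCommon
-- ===== SOURCE A (Python) =====
-- from typing import List
--
-- def getCommon(nums1: List[int], nums2: List[int]) -> int:
--
--     ret = []
--     nums1 = set(nums1)
--     nums2 = set(nums2)
--
--     for element in nums1:
--         if element in nums2:
--             ret.append(element)
--     ret = sorted(ret)
--
--     if ret:
--         return ret[0]
--
--     return -1
-- ===== SOURCE B (Python) =====
-- def getCommon(nums1, nums2):
--     a = sorted(nums1)
--     b = sorted(nums2)
--     i = 0
--     j = 0
--     while i < len(a) and j < len(b):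
--         if a[i] == b[j]:
--             return a[i]
--         if a[i] < b[j]:
--             i += 1
--         else:
--             j += 1
--     return -1
-- ===== Notes on version B (the rewrite author's own statement) =====
-- stated objective: alternative
-- what changed: Replaces set intersection plus sorting the whole intersection with a two-pointer merge scan over sorted copies of both lists that stops at the first (smallest) common value.
import Mathlib
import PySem

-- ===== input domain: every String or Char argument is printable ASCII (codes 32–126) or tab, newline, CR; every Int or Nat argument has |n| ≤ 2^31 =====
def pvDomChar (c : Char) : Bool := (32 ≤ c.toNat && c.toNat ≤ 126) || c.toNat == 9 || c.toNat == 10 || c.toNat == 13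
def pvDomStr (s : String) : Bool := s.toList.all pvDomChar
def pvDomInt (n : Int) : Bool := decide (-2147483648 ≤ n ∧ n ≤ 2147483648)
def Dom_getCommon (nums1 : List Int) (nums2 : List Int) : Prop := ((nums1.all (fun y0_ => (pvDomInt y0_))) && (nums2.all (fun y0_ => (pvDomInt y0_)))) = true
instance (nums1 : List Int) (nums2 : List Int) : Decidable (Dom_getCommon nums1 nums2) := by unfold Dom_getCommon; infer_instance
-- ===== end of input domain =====

-- B replaces the set-intersection-then-sort of A by a two-pointer merge scan over sorted copies
-- of both lists (alternative decomposition, similar cost).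


-- ===== PORT A =====
-- ret = []; for element in set(nums1): if element in set(nums2): ret.append(element)
-- (the iteration order over set(nums1) does not matter: ret is sorted before use)
def retA (nums1 : List Int) (nums2 : List Int) : List Int :=
  (PySem.Set.ofList nums1).foldl
    (fun r e => if PySem.Set.contains (PySem.Set.ofList nums2) e then r ++ [e] else r) []

-- ret = sorted(ret); return ret[0] if ret else -1
def getCommon (nums1 : List Int) (nums2 : List Int) : Int :=
  match PySem.List.sorted (retA nums1 nums2) (fun x => x) false with
  | x :: _ => x
  | [] => -1

-- ===== PORT B =====
-- the two-pointer while loop of Source B, as recursion on the two sorted lists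
def goCommon : List Int → List Int → Int
  | x :: xs, y :: ys =>
      if x = y then x
      else if x < y then goCommon xs (y :: ys)
      else goCommon (x :: xs) ys
  | _, _ => -1
  termination_by a b => a.length + b.length

def getCommon_alt (nums1 : List Int) (nums2 : List Int) : Int :=
  goCommon (PySem.List.sorted nums1 (fun x => x) false) (PySem.List.sorted nums2 (fun x => x) false)

-- ===== PRECONDITION & SPEC =====
def Spec_getCommon (nums1 : List Int) (nums2 : List Int) (out : Int) : Prop := out = getCommon_alt nums1 nums2
instance (nums1 : List Int) (nums2 : List Int) (out : Int) : Decidable (Spec_getCommon nums1 nums2 out) := by unfold Spec_getCommon; infer_instance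

-- ===== CLAIM (what is proved, stated in full; the proofs are below) =====
def Claim_equal_getCommon : Prop := ∀ (nums1 : List Int) (nums2 : List Int), Dom_getCommon nums1 nums2 → Spec_getCommon nums1 nums2 (getCommon nums1 nums2)

-- ===== LEMMAS AND PROOFS =====

-- if the two lists share no element, the merge scan returns -1
theorem goCommon_none (a b : List Int) (h : ∀ x, x ∈ a → x ∉ b) : goCommon a b = -1 := by
  induction a, b using goCommon.induct with
  | case1 xs y ys =>
    exact absurd List.mem_cons_self (fun hy => h y hy List.mem_cons_self)
  | case2 x xs y ys hxy hlt ih =>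
    rw [goCommon, if_neg hxy, if_pos hlt]
    exact ih (fun z hz => h z (List.mem_cons_of_mem _ hz))
  | case3 x xs y ys hxy hlt ih =>
    rw [goCommon, if_neg hxy, if_neg hlt]
    exact ih (fun z hz hzb => h z hz (List.mem_cons_of_mem _ hzb))
  | case4 a b hne => cases a with
    | nil => simp [goCommon]
    | cons x xs => cases b with
      | nil => simp [goCommon]
      | cons y ys => exact absurd rfl (fun hh => hne x xs y ys hh rfl)

-- on sorted inputs sharing an element z, the merge scan returns a shared element ≤ z
theorem goCommon_common (a b : List Int) (ha : a.Pairwise (· ≤ ·)) (hb : b.Pairwise (· ≤ ·)) :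
    ∀ z, z ∈ a → z ∈ b → goCommon a b ∈ a ∧ goCommon a b ∈ b ∧ goCommon a b ≤ z := by
  induction a, b using goCommon.induct with
  | case1 xs y ys =>
    intro z hza _
    rw [goCommon, if_pos rfl]
    refine ⟨List.mem_cons_self, List.mem_cons_self, ?_⟩
    rcases List.mem_cons.mp hza with rfl | hz
    · exact le_refl z
    · exact (List.pairwise_cons.mp ha).1 z hz
  | case2 x xs y ys hxy hlt ih =>
    intro z hza hzb
    have hz : z ∈ xs := by
      rcases List.mem_cons.mp hza with rfl | hz
      · exfalso
        rcases List.mem_cons.mp hzb with rfl | hz2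
        · exact hxy rfl
        · exact absurd ((List.pairwise_cons.mp hb).1 z hz2) (by omega)
      · exact hz
    rw [goCommon, if_neg hxy, if_pos hlt]
    obtain ⟨h1, h2, h3⟩ := ih (List.pairwise_cons.mp ha).2 hb z hz hzb
    exact ⟨List.mem_cons_of_mem _ h1, h2, h3⟩
  | case3 x xs y ys hxy hlt ih =>
    intro z hza hzb
    have hz : z ∈ ys := by
      rcases List.mem_cons.mp hzb with rfl | hz
      · exfalso
        rcases List.mem_cons.mp hza with rfl | hz2
        · exact hxy rfl
        · exact absurd ((List.pairwise_cons.mp ha).1 z hz2) (by omega)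
      · exact hz
    rw [goCommon, if_neg hxy, if_neg hlt]
    obtain ⟨h1, h2, h3⟩ := ih ha (List.pairwise_cons.mp hb).2 z hza hz
    exact ⟨h1, List.mem_cons_of_mem _ h2, h3⟩
  | case4 a b hne =>
    intro z hza hzb
    exfalso
    cases a with
    | nil => exact List.not_mem_nil hza
    | cons x xs => cases b with
      | nil => exact List.not_mem_nil hzb
      | cons y ys => exact hne x xs y ys rfl rfl

-- membership in A's intermediate list 'ret' (before sorting)
theorem mem_retA (nums1 nums2 : List Int) (x : Int) :
    x ∈ retA nums1 nums2 ↔ x ∈ nums1 ∧ x ∈ nums2 := by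
  unfold retA
  rw [PySem.List.foldl_append_if_eq_filter]
  simp [List.mem_filter, PySem.Set.mem_ofList]

theorem getCommon_eq (nums1 nums2 : List Int) : getCommon nums1 nums2 = getCommon_alt nums1 nums2 := by
  by_cases h : ∃ z, z ∈ nums1 ∧ z ∈ nums2
  · obtain ⟨z, hz1, hz2⟩ := h
    -- B side: its result is a common element
    obtain ⟨hB1, hB2, _⟩ := goCommon_common _ _
      (PySem.List.sorted_pairwise nums1 (fun x => x))
      (PySem.List.sorted_pairwise nums2 (fun x => x)) z
      ((PySem.List.mem_sorted _ _ _ _).mpr hz1) ((PySem.List.mem_sorted _ _ _ _).mpr hz2)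
    have hBmem1 : getCommon_alt nums1 nums2 ∈ nums1 := (PySem.List.mem_sorted _ _ _ _).mp hB1
    have hBmem2 : getCommon_alt nums1 nums2 ∈ nums2 := (PySem.List.mem_sorted _ _ _ _).mp hB2
    -- A side
    unfold getCommon
    have hzr : z ∈ retA nums1 nums2 := (mem_retA nums1 nums2 z).mpr ⟨hz1, hz2⟩
    cases hsr : PySem.List.sorted (retA nums1 nums2) (fun x => x) false with
    | nil =>
      exfalso
      have := (PySem.List.mem_sorted (retA nums1 nums2) (fun x => x) false z).mpr hzr
      rw [hsr] at this
      exact List.not_mem_nil this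
    | cons m t =>
      simp only
      -- m is a common element, minimal among elements of ret
      have hmret : m ∈ retA nums1 nums2 :=
        (PySem.List.mem_sorted _ _ _ _).mp (hsr ▸ List.mem_cons_self)
      obtain ⟨hm1, hm2⟩ := (mem_retA nums1 nums2 m).mp hmret
      have hBret : getCommon_alt nums1 nums2 ∈ retA nums1 nums2 :=
        (mem_retA nums1 nums2 _).mpr ⟨hBmem1, hBmem2⟩
      have h1 : m ≤ getCommon_alt nums1 nums2 :=
        PySem.List.key_head_sorted_le _ _ hsr _ hBret
      obtain ⟨_, _, h2⟩ := goCommon_common _ _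
        (PySem.List.sorted_pairwise nums1 (fun x => x))
        (PySem.List.sorted_pairwise nums2 (fun x => x)) m
        ((PySem.List.mem_sorted _ _ _ _).mpr hm1) ((PySem.List.mem_sorted _ _ _ _).mpr hm2)
      unfold getCommon_alt at h1 ⊢
      omega
  · -- no common element: both return -1
    push Not at h
    have hB : getCommon_alt nums1 nums2 = -1 := by
      apply goCommon_none
      intro x hx hx2
      exact h x ((PySem.List.mem_sorted _ _ _ _).mp hx) ((PySem.List.mem_sorted _ _ _ _).mp hx2)
    have hnil : retA nums1 nums2 = [] := by
      cases hr : retA nums1 nums2 with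
      | nil => rfl
      | cons m t =>
        obtain ⟨hm1, hm2⟩ := (mem_retA nums1 nums2 m).mp (hr ▸ List.mem_cons_self)
        exact absurd hm2 (h m hm1)
    unfold getCommon
    rw [hnil, hB]
    rfl

-- ===== VERDICT (by name: the statement is the Claim_ definition above) =====
theorem getCommon_spec : Claim_equal_getCommon := by
  intro nums1 nums2 _
  exact getCommon_eq nums1 nums2
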